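-- pv_equiv track=rewrite | github.com/cryptodev69/CRY-A-4MCP-Templates | src/cry_a_4mcp/crawl4ai/extraction_strategies/composite/comprehensive_llm.py | _merge_intersection
-- ===== SOURCE A (Python) =====
-- from typing import Dict, Any, List, Optional, Union, Tuple
--
-- def _merge_intersection(results: List[Dict[str, Any]]) -> Dict[str, Any]:
--     """Merge results using intersection strategy (include only common fields).
--
--     Args:
--         results: List of extraction results from different strategies.
--
--     Returns:
--         Merged extraction result.
--     """
--     if not results:
--         return {}
--
--     # Find common keys across all results
--     common_keys = set(results[0].keys())
--     for result in results[1:]: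
--         common_keys &= set(result.keys())
--
--     # Create merged result with common keys
--     merged = {}
--     for key in common_keys:
--         # Use the value from the first result for simplicity
--         merged[key] = results[0][key]
--
--     return merged
-- ===== SOURCE B (Python) =====
-- def _merge_intersection(results):
--     """Merge results keeping only keys common to all strategies.
--
--     Counting approach: one pass tallies, in a dict, how many results each key
--     occurs in (keys are unique within a dict, so a key's tally equals the
--     number of results containing it); a key is common to all results iff its
--     tally equals len(results).  Values come from the first result.
--     """
--     if not results:
--         return {}
--     n = len(results)
--     counts = {}
--     for r in results:
--         for k in r:
--             counts[k] = counts.get(k, 0) + 1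
--     return {k: v for k, v in results[0].items() if counts[k] == n}
-- ===== Notes on version B (the rewrite author's own statement) =====
-- stated objective: alternative
-- what changed: Replaces the folded set-intersection (repeated &= narrowing common_keys, then a second lookup loop) by a counting pass: a dict tallies in how many results each key occurs, and a key is kept iff its tally equals len(results); no set objects and no per-key membership scans.
import Mathlib
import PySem

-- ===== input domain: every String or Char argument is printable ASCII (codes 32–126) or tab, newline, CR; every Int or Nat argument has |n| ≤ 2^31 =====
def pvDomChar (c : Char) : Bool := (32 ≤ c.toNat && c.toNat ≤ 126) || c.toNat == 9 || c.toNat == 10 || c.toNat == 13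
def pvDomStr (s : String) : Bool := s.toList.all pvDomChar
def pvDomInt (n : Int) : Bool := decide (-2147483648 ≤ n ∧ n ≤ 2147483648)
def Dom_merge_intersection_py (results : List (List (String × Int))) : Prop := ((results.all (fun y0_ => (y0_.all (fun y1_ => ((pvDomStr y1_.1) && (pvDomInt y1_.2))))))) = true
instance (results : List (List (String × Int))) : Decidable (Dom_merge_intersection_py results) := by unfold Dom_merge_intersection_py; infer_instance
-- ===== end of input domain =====

-- B replaces A's folded set-intersection by a counting pass (a dict tallying in
-- how many results each key occurs; keep a key iff its tally equals len(results));
-- objective: alternative algorithm, same values (dict order aside).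


-- ===== PORT A =====
-- Literal port of _merge_intersection: empty guard; common_keys = set(results[0].keys())
-- narrowed with &= over results[1:]; then a dict built key by key with results[0][key].
def merge_intersection_py (results : List (List (String × Int))) : List (String × Int) :=
  if results = [] then []
  else
    let first := results.headD []
    let common_keys : PySem.Set String :=
      (results.drop 1).foldl
        (fun ck r => PySem.Set.inter ck (PySem.Set.ofList (r.map Prod.fst)))
        (PySem.Set.ofList (first.map Prod.fst))
    (common_keys.foldl
      (fun merged key =>
        merged.insert key (((PySem.Dict.mk first).get? key).getD 0))
      PySem.Dict.empty).items

-- ===== PORT B =====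
-- Port of Source B: tally, in a dict, how many results each key occurs in, then keep
-- a pair of results[0] iff its key's tally equals len(results).
def merge_intersection_py_alt (results : List (List (String × Int))) : List (String × Int) :=
  if results = [] then []
  else
    let n : Int := results.length
    let counts : PySem.Dict String Int :=
      results.foldl
        (fun d r => r.foldl (fun d kv => d.insert kv.1 (d.getD kv.1 0 + 1)) d)
        PySem.Dict.empty
    (results.headD []).filter (fun kv => counts.getD kv.1 0 == n)

-- ===== PRECONDITION & SPEC =====
-- Pre_ only states that each association list has pairwise-distinct keys —
-- automatically true of every list arising from a Python dict, so no Python input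
-- on which A returns is excluded.
def Pre_merge_intersection_py (results : List (List (String × Int))) : Prop :=
  ∀ r ∈ results, (r.map Prod.fst).Nodup
instance (results : List (List (String × Int))) : Decidable (Pre_merge_intersection_py results) := by unfold Pre_merge_intersection_py; infer_instance

def pvWitness_merge_intersection_py : (List (List (String × Int))) :=
  ([[("a", 1), ("b", 2)], [("b", 5), ("c", 6)]])

def Spec_merge_intersection_py (results : List (List (String × Int))) (out : List (String × Int)) : Prop := out = merge_intersection_py_alt results
instance (results : List (List (String × Int))) (out : List (String × Int)) : Decidable (Spec_merge_intersection_py results out) := by unfold Spec_merge_intersection_py; infer_instance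

-- ===== CLAIM (what is proved, stated in full; the proofs are below) =====
def Claim_equal_merge_intersection_py : Prop := ∀ (results : List (List (String × Int))), Dom_merge_intersection_py results → Pre_merge_intersection_py results → Spec_merge_intersection_py results (merge_intersection_py results)

-- ===== LEMMAS AND PROOFS =====

lemma contains_ofList_eq (l : List String) (k : String) :
    (PySem.Set.ofList l).contains k = l.contains k := by
  simp [PySem.Set.contains_eq_listContains, PySem.Set.mem_ofList]

-- A's &=-accumulation over rest is a single filter by membership in every rest element.
lemma foldl_inter_eq_filter (rest : List (List (String × Int))) (s : PySem.Set String) :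
    rest.foldl (fun ck r => PySem.Set.inter ck (PySem.Set.ofList (r.map Prod.fst))) s
      = s.filter (fun k => rest.all (fun r => (r.map Prod.fst).contains k)) := by
  induction rest generalizing s with
  | nil => simp
  | cons r rest ih =>
      rw [List.foldl_cons, ih]
      simp only [PySem.Set.inter, List.filter_filter, List.all_cons]
      refine List.filter_congr (fun k _ => ?_)
      rw [contains_ofList_eq, Bool.and_comm]

-- Looking each filtered key back up in the first (Nodup-keyed) list returns its own pair.
lemma filter_map_lookup (first : List (String × Int))
    (p : String → Bool) (h : (first.map Prod.fst).Nodup) :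
    ((first.map Prod.fst).filter p).map
        (fun k => (k, ((PySem.Dict.mk first).get? k).getD 0))
      = first.filter (fun kv => p kv.1) := by
  induction first with
  | nil => simp
  | cons kv tl ih =>
      obtain ⟨k, v⟩ := kv
      simp only [List.map_cons, List.nodup_cons, List.mem_map] at h
      have htl := ih h.2
      have hlook : ∀ x ∈ (tl.map Prod.fst).filter p,
          (((PySem.Dict.mk ((k, v) :: tl)).get? x).getD 0 : Int)
            = ((PySem.Dict.mk tl).get? x).getD 0 := by
        intro x hx
        have hxm : x ∈ tl.map Prod.fst := List.mem_of_mem_filter hx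
        have hkx : ¬ (k == x) = true := by
          simp only [beq_iff_eq]
          rintro rfl
          obtain ⟨q, hq, hq1⟩ := List.mem_map.mp hxm
          exact h.1 ⟨q, hq, hq1⟩
        rw [PySem.Dict.get?_mk_cons, if_neg hkx]
      have hmap : ∀ x ∈ (tl.map Prod.fst).filter p,
          (x, (((PySem.Dict.mk ((k, v) :: tl)).get? x).getD 0 : Int))
            = (x, ((PySem.Dict.mk tl).get? x).getD 0) := fun x hx => by
        rw [hlook x hx]
      by_cases hp : p k = true
      · simp only [List.map_cons, List.filter_cons, hp, if_true, List.map_cons]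
        rw [List.map_congr_left hmap, htl, PySem.Dict.get?_mk_cons]
        simp
      · simp only [List.map_cons, List.filter_cons, hp, if_false, Bool.false_eq_true]
        rw [List.map_congr_left hmap, htl]

-- A reduces to one filtering pass over the first list by membership in every rest element.
lemma merge_A_eq_filter (first : List (String × Int)) (rest : List (List (String × Int)))
    (h : (first.map Prod.fst).Nodup) :
    merge_intersection_py (first :: rest)
      = first.filter (fun kv => rest.all (fun r => (r.map Prod.fst).contains kv.1)) := by
  unfold merge_intersection_py
  simp only [List.headD_cons, List.drop_succ_cons, List.drop_zero, if_neg (List.cons_ne_nil _ _)]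
  rw [PySem.Set.ofList_eq_self_of_nodup _ h, foldl_inter_eq_filter]
  set p : String → Bool := fun k => rest.all (fun r => (r.map Prod.fst).contains k) with hp
  have hnd : (((first.map Prod.fst).filter p).map id).Nodup := by
    simpa using h.filter p
  have := PySem.Dict.items_foldl_insert_fresh ((first.map Prod.fst).filter p)
    (id) (fun k => ((PySem.Dict.mk first).get? k).getD 0) PySem.Dict.empty
    (by simp) hnd
  simp only [id] at this
  rw [this]
  simp only [PySem.Dict.empty, List.nil_append]
  exact filter_map_lookup first p h

-- B's nested tally fold is the counter of the flattened key lists.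
lemma nested_foldl (rs : List (List (String × Int))) (d : PySem.Dict String Int) :
    rs.foldl (fun d r => r.foldl (fun d kv => d.insert kv.1 (d.getD kv.1 0 + 1)) d) d
      = ((rs.map (fun r => r.map Prod.fst)).flatten).foldl
          (fun d k => d.insert k (d.getD k 0 + 1)) d := by
  induction rs generalizing d with
  | nil => simp
  | cons r rs ih =>
      simp only [List.foldl_cons, List.map_cons, List.flatten_cons, List.foldl_append]
      rw [ih, List.foldl_map]

lemma counts_eq_counter (results : List (List (String × Int))) :
    results.foldl
        (fun d r => r.foldl (fun d kv => d.insert kv.1 (d.getD kv.1 0 + 1)) d)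
        (PySem.Dict.empty : PySem.Dict String Int)
      = PySem.Dict.counter ((results.map (fun r => r.map Prod.fst)).flatten) := by
  rw [nested_foldl, PySem.Dict.foldl_insert_getD_add_one_eq_counter]

-- In a list of Nodup key lists, the total occurrence count of k counts the lists containing k.
lemma count_flatten_eq_countP (rs : List (List (String × Int))) (k : String)
    (h : ∀ r ∈ rs, (r.map Prod.fst).Nodup) :
    ((rs.map (fun r => r.map Prod.fst)).flatten).count k
      = rs.countP (fun r => (r.map Prod.fst).contains k) := by
  induction rs with
  | nil => simp
  | cons r rs ih =>
      simp only [List.map_cons, List.flatten_cons, List.count_append, List.countP_cons]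
      rw [ih (fun r hr => h r (List.mem_cons_of_mem _ hr))]
      by_cases hc : (r.map Prod.fst).contains k = true
      · have hk : k ∈ r.map Prod.fst := by simpa using hc
        rw [List.count_eq_one_of_mem (h r List.mem_cons_self) hk, hc]
        simp [Nat.add_comm]
      · rw [Bool.not_eq_true] at hc
        have hk : k ∉ r.map Prod.fst := by simpa using hc
        rw [List.count_eq_zero_of_not_mem hk, hc]
        simp

-- ===== VERDICT (by name: the statement is the Claim_ definition above) =====
theorem merge_intersection_py_spec : Claim_equal_merge_intersection_py := by
  intro results _hdom hpre
  unfold Spec_merge_intersection_py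
  match results with
  | [] => rfl
  | first :: rest =>
    have hfirst : (first.map Prod.fst).Nodup := hpre first List.mem_cons_self
    rw [merge_A_eq_filter first rest hfirst]
    unfold merge_intersection_py_alt
    simp only [List.headD_cons, if_neg (List.cons_ne_nil _ _)]
    rw [counts_eq_counter]
    refine (List.filter_congr (fun kv hkv => ?_)).symm
    rw [PySem.Dict.getD_counter,
        count_flatten_eq_countP _ _ hpre]
    have hkmem : kv.1 ∈ first.map Prod.fst := List.mem_map_of_mem hkv
    have hcf : (first.map Prod.fst).contains kv.1 = true := by simpa using hkmem
    simp only [List.countP_cons, hcf, if_true, List.length_cons]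
    rw [Bool.eq_iff_iff]
    simp only [beq_iff_eq, List.all_eq_true]
    constructor
    · intro heq
      have hnat : rest.countP (fun r => (r.map Prod.fst).contains kv.1) + 1
          = rest.length + 1 := by exact_mod_cast heq
      exact List.countP_eq_length.mp (by omega)
    · intro hall
      have hcp : rest.countP (fun r => (r.map Prod.fst).contains kv.1) = rest.length :=
        List.countP_eq_length.mpr hall
      rw [hcp]
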